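-- pv_equiv track=rewrite | github.com/baileym4/bacon | lab.py | movie_path
-- ===== SOURCE A (Python) =====
-- def movie_path(transformed_data, actors_path):
--     """
--     Using an actor path returns a path of
--     movies that connects them
--
--     Args:
--         transformed_data (list): A list of two dicts
--         one for actors and one for movies
--         actor dict has keys of actor ids and
--         values of a set of every actor they have
--         acted with. Movies dict has movie id
--         keys and values of a set of actor ids of
--         actors in that movie
--         actors_path (list): list of actor ids
--
--     Returns:
--         list: movie id list
--     """
--     movie_pathway = []
--
--     movie_info = transformed_data[1]
--     for i, current_actor in enumerate(actors_path):
--         # check to see if already checked all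
--         if i + 1 == len(actors_path):
--             break
--         for movie in movie_info:
--             if current_actor in movie_info[movie]:
--                 if actors_path[i + 1] in movie_info[movie]:
--                     movie_pathway.append(movie)
--
--     return movie_pathway
-- ===== SOURCE B (Python) =====
-- def movie_path(transformed_data, actors_path):
--     movie_info = transformed_data[1]
--     actor_movies = {}
--     for movie, cast in movie_info.items():
--         for actor in cast:
--             actor_movies.setdefault(actor, []).append(movie)
--     movie_pathway = []
--     for a, b in zip(actors_path, actors_path[1:]):
--         b_movies = set(actor_movies.get(b, []))
--         movie_pathway.extend(m for m in actor_movies.get(a, []) if m in b_movies)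
--     return movie_pathway
-- ===== Notes on version B (the rewrite author's own statement) =====
-- stated objective: faster
-- what changed: Instead of scanning every movie of the movies dict once per consecutive actor pair, B builds an actor-to-ordered-movie-list index in a single pass over the dict and, per pair, filters the first actor's movie list by set membership in the second actor's movies.
import Mathlib
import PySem

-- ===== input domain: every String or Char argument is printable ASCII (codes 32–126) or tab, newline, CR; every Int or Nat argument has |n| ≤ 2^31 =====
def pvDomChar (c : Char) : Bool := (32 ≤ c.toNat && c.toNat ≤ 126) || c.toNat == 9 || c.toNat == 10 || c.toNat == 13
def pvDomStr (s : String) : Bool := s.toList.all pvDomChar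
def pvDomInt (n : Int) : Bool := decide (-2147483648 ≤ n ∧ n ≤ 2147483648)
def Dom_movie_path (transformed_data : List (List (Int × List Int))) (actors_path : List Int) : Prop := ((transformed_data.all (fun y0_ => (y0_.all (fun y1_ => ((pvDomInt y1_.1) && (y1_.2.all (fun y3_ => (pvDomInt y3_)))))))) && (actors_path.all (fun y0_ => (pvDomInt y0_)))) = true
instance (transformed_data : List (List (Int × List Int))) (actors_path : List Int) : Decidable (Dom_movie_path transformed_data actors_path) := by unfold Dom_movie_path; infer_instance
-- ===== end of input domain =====

-- B builds an actor → ordered-movie-list index in one pass over the movies dict and intersects per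
-- consecutive actor pair, instead of A's scan of every movie for every pair (objective: faster).

-- ===== PORT A =====
-- Python's `break` fires only at the last index (i + 1 == len), so skipping that iteration is the same.
def movie_path (transformed_data : List (List (Int × List Int))) (actors_path : List Int) : List Int :=
  match PySem.List.pyGet? transformed_data 1 with
  | none => []  -- IndexError: transformed_data[1]; excluded by Pre_
  | some mi =>
    let d : PySem.Dict Int (List Int) := PySem.Dict.mk mi
    (PySem.List.enumerate actors_path).foldl (fun acc pr =>
      if pr.1 + 1 = (actors_path.length : Int) then acc
      else
        match PySem.List.pyGet? actors_path (pr.1 + 1) with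
        | none => acc  -- unreachable: 0 ≤ i+1 < len(actors_path)
        | some nxt =>
          d.keys.foldl (fun acc2 m =>
            match d.get? m with
            | none => acc2  -- unreachable: m is a key of d
            | some s =>
              if PySem.Set.contains s pr.2 then
                if PySem.Set.contains s nxt then acc2 ++ [m] else acc2
              else acc2) acc) []

-- ===== PORT B =====
def movie_path_alt (transformed_data : List (List (Int × List Int))) (actors_path : List Int) : List Int :=
  match PySem.List.pyGet? transformed_data 1 with
  | none => []  -- IndexError: transformed_data[1]; excluded by Pre_
  | some mi =>
    let idx : PySem.Dict Int (List Int) :=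
      mi.foldl (fun d p => p.2.foldl (fun d a => d.modify a [] (· ++ [p.1])) d) PySem.Dict.empty
    (actors_path.zip (PySem.List.slice actors_path (some 1) none)).foldl (fun res pr =>
      let bm : PySem.Set Int := PySem.Set.ofList (idx.getD pr.2 [])
      res ++ (idx.getD pr.1 []).filter (fun m => PySem.Set.contains bm m)) []

-- ===== PRECONDITION & SPEC =====
-- Pre_ excludes (i) transformed_data with fewer than two elements, where A raises IndexError, and
-- (ii) association lists that represent no Python value under the type convention: a duplicate key in
-- the movies dict, or a duplicate element in a value list standing for a Python set of actor ids.
def Pre_movie_path (transformed_data : List (List (Int × List Int))) (actors_path : List Int) : Prop :=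
  2 ≤ transformed_data.length ∧
  ((transformed_data.getD 1 []).map Prod.fst).Nodup ∧
  ∀ p ∈ transformed_data.getD 1 [], p.2.Nodup
instance (transformed_data : List (List (Int × List Int))) (actors_path : List Int) : Decidable (Pre_movie_path transformed_data actors_path) := by unfold Pre_movie_path; infer_instance
def pvWitness_movie_path : (List (List (Int × List Int))) × List Int :=
  ([[(1, [10, 11])], [(10, [1, 2]), (11, [2, 3])]], [1, 2, 3])
def Spec_movie_path (transformed_data : List (List (Int × List Int))) (actors_path : List Int) (out : List Int) : Prop := out = movie_path_alt transformed_data actors_path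
instance (transformed_data : List (List (Int × List Int))) (actors_path : List Int) (out : List Int) : Decidable (Spec_movie_path transformed_data actors_path out) := by unfold Spec_movie_path; infer_instance

-- ===== CLAIM (what is proved, stated in full; the proofs are below) =====
def Claim_equal_movie_path : Prop := ∀ (transformed_data : List (List (Int × List Int))) (actors_path : List Int), Dom_movie_path transformed_data actors_path → Pre_movie_path transformed_data actors_path → Spec_movie_path transformed_data actors_path (movie_path transformed_data actors_path)

-- ===== LEMMAS AND PROOFS =====

-- the per-pair value both programs compute: movies whose cast contains both a and b, in dict order
def pvPair (mi : List (Int × List Int)) (a b : Int) : List Int :=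
  (mi.filter (fun p => p.2.contains a && p.2.contains b)).map Prod.fst

-- A's inner scan over all movies, for one consecutive pair (a, b)
theorem pv_inner_A (mi : List (Int × List Int)) (hk : (mi.map Prod.fst).Nodup)
    (a b : Int) (acc : List Int) :
    (PySem.Dict.mk mi).keys.foldl (fun acc2 m =>
      match (PySem.Dict.mk mi).get? m with
      | none => acc2
      | some s =>
        if PySem.Set.contains s a then
          if PySem.Set.contains s b then acc2 ++ [m] else acc2
        else acc2) acc = acc ++ pvPair mi a b := by
  have hkeys : (PySem.Dict.mk mi).keys = mi.map Prod.fst := rfl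
  rw [hkeys, List.foldl_map]
  refine Eq.trans (PySem.List.foldl_congr_mem mi _
    (fun acc2 p => if p.2.contains a && p.2.contains b then acc2 ++ [p.1] else acc2) acc ?_) ?_
  · intro acc2 p hp
    have hget : (PySem.Dict.mk mi).get? p.1 = some p.2 :=
      PySem.Dict.get?_of_mem_items (PySem.Dict.mk mi) hp (by simpa [hkeys] using hk)
    rw [hget]
    simp only [PySem.Set.contains_eq_listContains]
    cases h1 : p.2.contains a <;> simp
  · rw [PySem.List.foldl_append_if]
    rfl

theorem pv_flatMap_if_singleton {α β : Type} (l : List α) (p : α → Bool) (f : α → β) :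
    l.flatMap (fun x => if p x then [f x] else []) = (l.filter p).map f := by
  induction l with
  | nil => rfl
  | cons x t ih =>
    by_cases h : p x = true <;> simp [List.flatMap_cons, h, ih]

-- B's index, looked up at one actor: the movies whose cast contains that actor, in dict order
theorem pv_idx_getD (mi : List (Int × List Int)) (hv : ∀ p ∈ mi, p.2.Nodup) (a : Int) :
    (mi.foldl (fun d p => p.2.foldl (fun d x => d.modify x [] (· ++ [p.1])) d)
      (PySem.Dict.empty : PySem.Dict Int (List Int))).getD a []
      = (mi.filter (fun p => p.2.contains a)).map Prod.fst := by
  -- the nested loop is the flat loop over all (actor, movie) incidences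
  have hfold : mi.foldl (fun d p => p.2.foldl (fun d x => d.modify x [] (· ++ [p.1])) d)
      (PySem.Dict.empty : PySem.Dict Int (List Int))
      = (mi.flatMap (fun p => p.2.map (fun x => (x, p.1)))).foldl
          (fun d q => d.modify q.1 [] (· ++ [q.2])) PySem.Dict.empty := by
    rw [List.foldl_flatMap]
    refine PySem.List.foldl_congr_mem mi _ _ _ ?_
    intro d p _
    rw [List.foldl_map]
  rw [hfold, PySem.Dict.getD_foldl_modify_append, PySem.Dict.getD_empty, List.nil_append]
  rw [List.filter_flatMap, List.map_flatMap]
  rw [← pv_flatMap_if_singleton mi (fun p => p.2.contains a) Prod.fst]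
  refine List.flatMap_congr ?_
  intro p hp
  rw [List.filter_map]
  have : (fun q : Int × Int => q.1 == a) ∘ (fun x => (x, p.1)) = fun x => x == a := rfl
  rw [this, List.filter_beq, List.map_map, List.map_replicate]
  have hc := List.nodup_iff_count_le_one.mp (hv p hp) a
  by_cases hmem : a ∈ p.2
  · have : p.2.count a = 1 := le_antisymm hc (List.count_pos_iff.mpr hmem)
    simp [this, hmem]
  · have : p.2.count a = 0 := List.count_eq_zero.mpr hmem
    simp [this, hmem]

-- B's per-pair intersection equals the movies containing both actors
theorem pv_pair_B (mi : List (Int × List Int)) (hk : (mi.map Prod.fst).Nodup)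
    (hv : ∀ p ∈ mi, p.2.Nodup) (a b : Int) :
    (((mi.foldl (fun d p => p.2.foldl (fun d x => d.modify x [] (· ++ [p.1])) d)
        (PySem.Dict.empty : PySem.Dict Int (List Int))).getD a []).filter (fun m =>
      PySem.Set.contains (PySem.Set.ofList
        ((mi.foldl (fun d p => p.2.foldl (fun d x => d.modify x [] (· ++ [p.1])) d)
          (PySem.Dict.empty : PySem.Dict Int (List Int))).getD b [])) m))
      = pvPair mi a b := by
  rw [pv_idx_getD mi hv a, pv_idx_getD mi hv b]
  have hmemb : ∀ p ∈ mi, (p.1 ∈ (mi.filter (fun q => q.2.contains b)).map Prod.fst) ↔ b ∈ p.2 := by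
    intro p hp
    constructor
    · rintro hm
      rcases List.mem_map.mp hm with ⟨q, hq, hq1⟩
      rcases List.mem_filter.mp hq with ⟨hqmi, hqb⟩
      have : q = p := List.inj_on_of_nodup_map hk hqmi hp hq1
      rw [← this]
      exact List.contains_iff_mem.mp hqb
    · intro hb
      exact List.mem_map.mpr ⟨p, List.mem_filter.mpr ⟨hp, List.contains_iff_mem.mpr hb⟩, rfl⟩
  rw [List.filter_map, List.filter_filter]
  unfold pvPair
  refine congrArg (List.map Prod.fst) (List.filter_congr ?_)
  intro p hp
  have h2 : (PySem.Set.ofList ((mi.filter (fun q => q.2.contains b)).map Prod.fst)).contains p.1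
      = p.2.contains b := by
    rw [PySem.Set.contains_eq_listContains, Bool.eq_iff_iff]
    simp only [List.contains_iff_mem]
    exact (PySem.Set.mem_ofList _ _).trans (hmemb p hp)
  simp only [Function.comp_apply]
  rw [h2, Bool.and_comm]

-- A's enumerate-and-index outer loop is the fold over consecutive pairs
theorem pv_outer_A (G : Int → Int → List Int) (F : Int → Int → List Int → List Int)
    (hF : ∀ a b acc, F a b acc = acc ++ G a b) :
    ∀ (l : List Int) (ap : List Int) (j : Nat) (acc : List Int), j + l.length = ap.length → ap.drop j = l →
    (PySem.List.enumerate l (j : Int)).foldl (fun acc pr =>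
      if pr.1 + 1 = (ap.length : Int) then acc
      else
        match PySem.List.pyGet? ap (pr.1 + 1) with
        | none => acc
        | some nxt => F pr.2 nxt acc) acc
      = acc ++ (l.zip l.tail).flatMap (fun pr => G pr.1 pr.2) := by
  intro l
  induction l with
  | nil => intro ap j acc _ _; simp [PySem.List.enumerate_nil]
  | cons x t ih =>
    intro ap j acc hlen hdrop
    rw [PySem.List.enumerate_cons, List.foldl_cons]
    cases t with
    | nil =>
      have hj : (j : Int) + 1 = (ap.length : Int) := by
        simp at hlen; omega
      simp [hj]
    | cons y t2 =>
      have hne : ¬ ((j : Int) + 1 = (ap.length : Int)) := by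
        simp at hlen; omega
      rw [if_neg hne]
      have hcast : (j : Int) + 1 = ((j + 1 : Nat) : Int) := by push_cast; ring
      have hget : PySem.List.pyGet? ap ((j : Int) + 1) = some y := by
        rw [hcast, PySem.List.pyGet?_natCast]
        have : ap[j + 1]? = (ap.drop j)[1]? := by
          rw [List.getElem?_drop]
        rw [this, hdrop]
        rfl
      rw [hget]
      rw [show (match some y with | none => acc | some nxt => F (((j:Int), x)).2 nxt acc) = F x y acc from rfl, hF]
      have hdrop' : ap.drop (j + 1) = y :: t2 := by
        have h : (List.drop j ap).tail = List.drop (j+1) ap := List.tail_drop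
        rw [hdrop] at h
        simpa using h.symm
      have hlen' : (j + 1) + (y :: t2).length = ap.length := by
        simp at hlen ⊢; omega
      rw [hcast, ih ap (j + 1) (acc ++ G x y) hlen' hdrop']
      simp [List.zip_cons_cons, List.flatMap_cons]

-- unfolding the ports once transformed_data[1] is known
theorem pv_A_eq (td : List (List (Int × List Int))) (ap : List Int) (mi : List (Int × List Int))
    (h : PySem.List.pyGet? td 1 = some mi) :
    movie_path td ap = (PySem.List.enumerate ap).foldl (fun acc pr =>
      if pr.1 + 1 = (ap.length : Int) then acc
      else
        match PySem.List.pyGet? ap (pr.1 + 1) with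
        | none => acc
        | some nxt =>
          (PySem.Dict.mk mi).keys.foldl (fun acc2 m =>
            match (PySem.Dict.mk mi).get? m with
            | none => acc2
            | some s =>
              if PySem.Set.contains s pr.2 then
                if PySem.Set.contains s nxt then acc2 ++ [m] else acc2
              else acc2) acc) [] := by
  unfold movie_path
  rw [h]

theorem pv_B_eq (td : List (List (Int × List Int))) (ap : List Int) (mi : List (Int × List Int))
    (h : PySem.List.pyGet? td 1 = some mi) :
    movie_path_alt td ap = (ap.zip (PySem.List.slice ap (some 1) none)).foldl (fun res pr =>
      res ++ ((mi.foldl (fun d p => p.2.foldl (fun d a => d.modify a [] (· ++ [p.1])) d)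
        (PySem.Dict.empty : PySem.Dict Int (List Int))).getD pr.1 []).filter (fun m =>
          PySem.Set.contains (PySem.Set.ofList
            ((mi.foldl (fun d p => p.2.foldl (fun d a => d.modify a [] (· ++ [p.1])) d)
              (PySem.Dict.empty : PySem.Dict Int (List Int))).getD pr.2 [])) m)) [] := by
  unfold movie_path_alt
  rw [h]

-- ===== VERDICT (by name: the statement is the Claim_ definition above) =====
theorem movie_path_spec : Claim_equal_movie_path := by
  intro td ap _ hPre
  obtain ⟨hlen, hk, hv⟩ := hPre
  have hmi : PySem.List.pyGet? td 1 = some (td.getD 1 []) := by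
    rw [PySem.List.pyGet?_of_nonneg td (i := 1) (by omega)]
    show td[(1:Nat)]? = _
    rw [List.getElem?_eq_getElem (by omega), List.getD_eq_getElem _ _ (by omega)]
  unfold Spec_movie_path
  rw [pv_A_eq td ap _ hmi, pv_B_eq td ap _ hmi]
  have hA := pv_outer_A (pvPair (td.getD 1 []))
    (fun a b acc => (PySem.Dict.mk (td.getD 1 [])).keys.foldl (fun acc2 m =>
      match (PySem.Dict.mk (td.getD 1 [])).get? m with
      | none => acc2
      | some s =>
        if PySem.Set.contains s a then
          if PySem.Set.contains s b then acc2 ++ [m] else acc2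
        else acc2) acc)
    (fun a b acc => pv_inner_A (td.getD 1 []) hk a b acc)
    ap ap 0 [] (by simp) (by simp)
  simp only [Nat.cast_zero] at hA
  rw [hA, PySem.List.slice_from_one]
  rw [PySem.List.foldl_append_eq_flatMap]
  refine congrArg _ (List.flatMap_congr ?_).symm
  intro pr _
  exact pv_pair_B (td.getD 1 []) hk hv pr.1 pr.2
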